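-- pv_equiv track=rewrite | github.com/elf004-star/cq-obsidian-skills | scripts/markdown-processor scripts/process_markdown.py | normalize_code_blocks
-- ===== SOURCE A (Python) =====
-- def normalize_code_blocks(content: str) -> str:
--     """Ensure consistent code block format."""
--     lines = content.split('\n')
--     result = []
--     in_code_block = False
--     code_start = 0
--     for i, line in enumerate(lines):
--         if line.strip().startswith('```'):
--             if not in_code_block:
--                 in_code_block = True
--                 code_start = i
--                 result.append(line)
--             else:
--                 in_code_block = False
--                 result.append(line)
--         elif not in_code_block:
--             result.append(line)
--     return '\n'.join(result)
-- ===== SOURCE B (Python) =====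
-- def normalize_code_blocks(content: str) -> str:
--     """Ensure consistent code block format."""
--     lines = content.split('\n')
--     flags = [line.strip().startswith('```') for line in lines]
--     # exclusive prefix counts of fence lines
--     prefix = []
--     total = 0
--     for f in flags:
--         prefix.append(total)
--         total += f
--     kept = [line for line, f, p in zip(lines, flags, prefix)
--             if f or p % 2 == 0]
--     return '\n'.join(kept)
-- ===== Notes on version B (the rewrite author's own statement) =====
-- stated objective: alternative
-- what changed: Replaces the inline in_code_block toggle state machine with a precomputed fence-flag list and an exclusive prefix-count of fences, then keeps a line in one filtering comprehension iff it is a fence or the number of fences strictly before it is even.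
import Mathlib
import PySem

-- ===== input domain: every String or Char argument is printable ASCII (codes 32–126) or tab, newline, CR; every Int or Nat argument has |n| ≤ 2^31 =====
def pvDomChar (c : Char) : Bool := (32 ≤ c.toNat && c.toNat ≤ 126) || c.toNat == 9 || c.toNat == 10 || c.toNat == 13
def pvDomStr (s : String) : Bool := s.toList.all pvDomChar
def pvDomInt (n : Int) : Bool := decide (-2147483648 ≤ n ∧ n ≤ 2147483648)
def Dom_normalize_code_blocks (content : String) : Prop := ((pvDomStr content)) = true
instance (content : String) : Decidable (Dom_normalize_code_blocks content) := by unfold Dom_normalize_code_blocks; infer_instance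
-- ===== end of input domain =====

-- B replaces A's inline toggle state machine by a precomputed fence-flag list plus an
-- exclusive prefix count of fences and a single parity-based filtering pass (alternative decomposition).

-- ===== PORT A =====
-- line.strip().startswith('```'), the fence test both sources write inline
def pvFence (line : String) : Bool := PySem.Str.startswith (PySem.Str.strip line) "```"

-- A's loop over enumerate(lines) with state (result, in_code_block, code_start)
def normalize_code_blocks (content : String) : String :=
  let lines := (PySem.Str.split? content "\n").getD []
  let st := (PySem.List.enumerate lines).foldl
    (fun (st : List String × Bool × Int) il =>
      if pvFence il.2 then
        if !st.2.1 then (st.1 ++ [il.2], true, il.1)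
        else (st.1 ++ [il.2], false, st.2.2)
      else if !st.2.1 then (st.1 ++ [il.2], st.2.1, st.2.2)
      else st)
    ([], false, 0)
  PySem.Str.join "\n" st.1

-- ===== PORT B =====
-- B: fence flags, exclusive prefix counts (running total), one zip-filter, join
def normalize_code_blocks_alt (content : String) : String :=
  let lines := (PySem.Str.split? content "\n").getD []
  let flags := lines.map (fun line => pvFence line)
  let pt := flags.foldl
    (fun (st : List Int × Int) f => (st.1 ++ [st.2], st.2 + (if f then 1 else 0)))
    ([], 0)
  let kept := (((lines.zip flags).zip pt.1).filter
      (fun x => x.1.2 || decide (PySem.Int.mod x.2 2 = 0))).map (fun x => x.1.1)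
  PySem.Str.join "\n" kept

-- ===== PRECONDITION & SPEC =====
def Spec_normalize_code_blocks (content : String) (out : String) : Prop := out = normalize_code_blocks_alt content
instance (content : String) (out : String) : Decidable (Spec_normalize_code_blocks content out) := by unfold Spec_normalize_code_blocks; infer_instance

-- ===== CLAIM (what is proved, stated in full; the proofs are below) =====
def Claim_equal_normalize_code_blocks : Prop := ∀ (content : String), Dom_normalize_code_blocks content → Spec_normalize_code_blocks content (normalize_code_blocks content)

-- ===== LEMMAS AND PROOFS =====

-- the kept lines, characterized structurally (b = "currently inside a code block")
def pvSpecKeep (lines : List String) (b : Bool) : List String :=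
  match lines with
  | [] => []
  | l :: ls =>
    if pvFence l then l :: pvSpecKeep ls (!b)
    else if b then pvSpecKeep ls b else l :: pvSpecKeep ls b

-- A's fold produces exactly acc ++ pvSpecKeep lines b
theorem pvA_fold (lines : List String) (acc : List String) (b : Bool) (i cs : Int) :
    ((PySem.List.enumerate lines i).foldl
      (fun (st : List String × Bool × Int) il =>
        if pvFence il.2 then
          if !st.2.1 then (st.1 ++ [il.2], true, il.1)
          else (st.1 ++ [il.2], false, st.2.2)
        else if !st.2.1 then (st.1 ++ [il.2], st.2.1, st.2.2)
        else st)
      (acc, b, cs)).1 = acc ++ pvSpecKeep lines b := by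
  induction lines generalizing acc b i cs with
  | nil => simp [pvSpecKeep]
  | cons l ls ih =>
    rw [PySem.List.enumerate_cons]
    by_cases hf : pvFence l = true
    · cases b <;>
        · simp only [pvSpecKeep, hf, List.foldl_cons, reduceIte, Bool.not_false, Bool.not_true,
            Bool.false_eq_true, if_false]
          rw [ih]
          simp
    · cases b <;>
        · simp only [pvSpecKeep, hf, List.foldl_cons, reduceIte, Bool.not_false, Bool.not_true,
            Bool.false_eq_true, if_false]
          first
          | (rw [ih]; simp)
          | exact ih _ _ _ _

-- B's prefix-table fold, characterized structurally
def pvPTable (flags : List Bool) (t : Int) : List Int :=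
  match flags with
  | [] => []
  | f :: fs => t :: pvPTable fs (t + (if f then 1 else 0))

theorem pvB_fold (flags : List Bool) (ps : List Int) (t : Int) :
    (flags.foldl
      (fun (st : List Int × Int) f => (st.1 ++ [st.2], st.2 + (if f then 1 else 0)))
      (ps, t)).1 = ps ++ pvPTable flags t := by
  induction flags generalizing ps t with
  | nil => simp [pvPTable]
  | cons f fs ih => simp [pvPTable, List.foldl_cons, ih]

-- B's zip-filter equals the structural characterization, with b the parity of t
theorem pvB_filter (lines : List String) (t : Int) (ht : 0 ≤ t) (b : Bool)
    (hb : b = decide (PySem.Int.mod t 2 = 1)) :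
    ((((lines.zip (lines.map (fun line => pvFence line))).zip
        (pvPTable (lines.map (fun line => pvFence line)) t)).filter
      (fun x => x.1.2 || decide (PySem.Int.mod x.2 2 = 0))).map (fun x => x.1.1))
    = pvSpecKeep lines b := by
  induction lines generalizing t b with
  | nil => simp only [pvSpecKeep, pvPTable, List.map_nil, List.zip_nil_right, List.filter_nil]
  | cons l ls ih =>
    have hmod : PySem.Int.mod t 2 = t % 2 := PySem.Int.mod_eq_emod_of_pos (by norm_num)
    by_cases hf : pvFence l = true
    · have hrec := ih (t + 1) (by omega) (!b)
        (by
          have h1 : PySem.Int.mod (t + 1) 2 = (t + 1) % 2 :=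
            PySem.Int.mod_eq_emod_of_pos (by norm_num)
          subst hb
          simp only [h1, hmod]
          rcases Int.emod_two_eq t with h | h <;>
            · have h2 : (t + 1) % 2 = 1 - t % 2 := by omega
              simp [h2, h]
        )
      simp only [pvSpecKeep, pvPTable, List.map_cons, List.zip_cons_cons, List.filter_cons, hf,
        Bool.true_or, reduceIte]
      rw [hrec]
    · have hfn : pvFence l = false := by simpa using hf
      have hrec := ih t ht b hb
      by_cases hb2 : b = true
      · have hz : PySem.Int.mod t 2 ≠ 0 := by
          subst hb; rw [hmod] at hb2 ⊢; rcases Int.emod_two_eq t with h | h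
          · simp [h] at hb2
          · omega
        have hdz : decide (PySem.Int.mod t 2 = 0) = false := decide_eq_false hz
        simp only [pvSpecKeep, pvPTable, List.map_cons, List.zip_cons_cons, List.filter_cons,
          hfn, hb2, hdz, Bool.false_or, Bool.false_eq_true, if_false, reduceIte, add_zero]
        rw [hrec, hb2]
      · have hbf : b = false := by simpa using hb2
        have hz : PySem.Int.mod t 2 = 0 := by
          subst hb; rw [hmod] at hbf ⊢; rcases Int.emod_two_eq t with h | h
          · exact h
          · simp [h] at hbf
        have hdz : decide (PySem.Int.mod t 2 = 0) = true := decide_eq_true hz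
        simp only [pvSpecKeep, pvPTable, List.map_cons, List.zip_cons_cons, List.filter_cons,
          hfn, hbf, hdz, Bool.false_or, Bool.false_eq_true, if_false, reduceIte, add_zero]
        rw [hrec, hbf]

-- ===== VERDICT (by name: the statement is the Claim_ definition above) =====
theorem normalize_code_blocks_spec : Claim_equal_normalize_code_blocks := by
  intro content _
  unfold Spec_normalize_code_blocks normalize_code_blocks normalize_code_blocks_alt
  simp only [pvA_fold, pvB_fold, List.nil_append]
  rw [pvB_filter _ 0 (by norm_num) false (by decide)]
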